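-- pv_equiv track=rewrite | github.com/Dark-Avenger-Reborn/Jeopardy-Engine | trigger_break.py | apply_team_to_target
-- ===== SOURCE A (Python) =====
-- def apply_team_to_target(target, team_number=None):
--     """Replace any `x` host octet placeholder in target addresses with team number."""
--     if team_number is None:
--         return target
--
--     host, sep, port = target.partition(':')
--     octets = host.split('.')
--     resolved_host = '.'.join(
--         str(team_number) if octet.lower() == 'x' else octet
--         for octet in octets
--     )
--     return f"{resolved_host}{sep}{port}" if sep else resolved_host
-- ===== SOURCE B (Python) =====
-- def apply_team_to_target(target, team_number=None):
--     """Replace any `x` host octet placeholder in target addresses with team number.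
--
--     Single left-to-right scan (state machine) instead of partition/split/join.
--     """
--     if team_number is None:
--         return target
--     rep = str(team_number)
--     out = []
--     cur = []
--     for i, ch in enumerate(target):
--         if ch == ':':
--             token = ''.join(cur)
--             out.append(rep if token in ('x', 'X') else token)
--             out.append(target[i:])
--             return ''.join(out)
--         if ch == '.':
--             token = ''.join(cur)
--             out.append(rep if token in ('x', 'X') else token)
--             out.append('.')
--             cur = []
--         else:
--             cur.append(ch)
--     token = ''.join(cur)
--     out.append(rep if token in ('x', 'X') else token)
--     return ''.join(out)
-- ===== Notes on version B (the rewrite author's own statement) =====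
-- stated objective: alternative
-- what changed: Replaces the partition/split/join pipeline with a single left-to-right character scan that accumulates the current octet, flushes it (substituting the team number for a lone x or X) at each dot, and copies everything from the first colon onwards verbatim.
import Mathlib
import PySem

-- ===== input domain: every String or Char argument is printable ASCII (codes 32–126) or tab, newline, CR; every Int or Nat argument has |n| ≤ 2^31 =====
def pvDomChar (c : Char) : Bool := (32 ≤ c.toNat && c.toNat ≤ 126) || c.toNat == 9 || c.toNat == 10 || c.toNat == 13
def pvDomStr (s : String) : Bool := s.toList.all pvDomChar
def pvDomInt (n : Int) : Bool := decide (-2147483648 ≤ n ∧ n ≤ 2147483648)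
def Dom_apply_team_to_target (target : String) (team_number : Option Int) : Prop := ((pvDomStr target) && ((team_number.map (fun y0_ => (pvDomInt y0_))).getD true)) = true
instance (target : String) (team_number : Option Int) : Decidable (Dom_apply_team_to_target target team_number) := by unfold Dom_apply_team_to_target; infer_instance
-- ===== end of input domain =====

-- B replaces A's partition/split/join pipeline with a single left-to-right scan; alternative decomposition, same behaviour.


-- ===== PORT A =====
-- hand port of Python's target.partition(':') (PySem has no partition): scan for the first ':'; exact
def pvPartitionColon : List Char → List Char × List Char × List Char
  | [] => ([], [], [])
  | c :: rest =>
    if c = ':' then ([], [':'], rest)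
    else
      let r := pvPartitionColon rest
      (c :: r.1, r.2.1, r.2.2)

def apply_team_to_target (target : String) (team_number : Option Int) : String :=
  match team_number with
  | none => target
  | some n =>
    let p := pvPartitionColon target.toList
    let host := p.1
    let sep := p.2.1
    let port := p.2.2
    let octets := PySem.Chars.splitOn host ['.']
    let resolved := PySem.Chars.join ['.']
      (octets.map (fun o => if PySem.Chars.lower o = ['x'] then PySem.Int.toChars n else o))
    if sep ≠ [] then String.mk (resolved ++ sep ++ port) else String.mk resolved

-- ===== PORT B =====
-- flush the accumulated octet: a lone 'x'/'X' becomes the team number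
def pvFlush (rep cur : List Char) : List Char :=
  if cur = ['x'] ∨ cur = ['X'] then rep else cur

-- the single left-to-right scan of Source B (early return at ':', flush at '.')
def pvScan (rep : List Char) : List Char → List Char → List Char
  | [], cur => pvFlush rep cur
  | c :: rest, cur =>
    if c = ':' then pvFlush rep cur ++ c :: rest
    else if c = '.' then pvFlush rep cur ++ '.' :: pvScan rep rest []
    else pvScan rep rest (cur ++ [c])

def apply_team_to_target_alt (target : String) (team_number : Option Int) : String :=
  match team_number with
  | none => target
  | some n => String.mk (pvScan (PySem.Int.toChars n) target.toList [])

-- ===== PRECONDITION & SPEC =====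
def Spec_apply_team_to_target (target : String) (team_number : Option Int) (out : String) : Prop := out = apply_team_to_target_alt target team_number
instance (target : String) (team_number : Option Int) (out : String) : Decidable (Spec_apply_team_to_target target team_number out) := by unfold Spec_apply_team_to_target; infer_instance

-- ===== CLAIM (what is proved, stated in full; the proofs are below) =====
def Claim_equal_apply_team_to_target : Prop := ∀ (target : String) (team_number : Option Int), Dom_apply_team_to_target target team_number → Spec_apply_team_to_target target team_number (apply_team_to_target target team_number)

-- ===== LEMMAS AND PROOFS =====

-- reference splitter for '.'-splitting, used only in the proofs
def pvSplitAux : List Char → List Char → List (List Char)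
  | cur, [] => [cur]
  | cur, c :: rest => if c = '.' then cur :: pvSplitAux [] rest else pvSplitAux (cur ++ [c]) rest

theorem pvSplitAux_ne_nil (cur l : List Char) : pvSplitAux cur l ≠ [] := by
  induction l generalizing cur with
  | nil => simp [pvSplitAux]
  | cons c rest ih =>
    simp only [pvSplitAux]
    split
    · simp
    · exact ih _

theorem pv_splitOn_go (fuel : Nat) (l cur : List Char) (acc : List (List Char))
    (h : l.length < fuel) :
    PySem.Chars.splitOn.go ['.'] fuel l cur acc = acc.reverse ++ pvSplitAux cur.reverse l := by
  induction fuel generalizing l cur acc with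
  | zero => omega
  | succ f ih =>
    rw [PySem.Chars.splitOn.go.eq_def]
    cases l with
    | nil => simp [pvSplitAux]
    | cons c rest =>
      simp only []
      by_cases hc : c = '.'
      · subst hc
        have hp : List.isPrefixOf ['.'] ('.' :: rest) = true := by
          simp [List.isPrefixOf]
        rw [if_pos hp]
        have hd : List.drop (['.'] : List Char).length ('.' :: rest) = rest := rfl
        simp only [List.length_cons] at h
        rw [hd, ih _ _ _ (by omega)]
        simp [pvSplitAux]
      · have hp : List.isPrefixOf ['.'] (c :: rest) = false := by
          simp [List.isPrefixOf]
          exact fun h' => hc h'.symm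
        rw [if_neg (by simp [hp])]
        simp only [List.length_cons] at h
        rw [ih _ _ _ (by omega)]
        simp [pvSplitAux, hc]

theorem pv_splitOn_eq (host : List Char) :
    PySem.Chars.splitOn host ['.'] = pvSplitAux [] host := by
  unfold PySem.Chars.splitOn
  rw [pv_splitOn_go _ _ _ _ (by omega)]
  simp

theorem pv_lowerChar_x (c : Char) : PySem.Chars.lowerChar c = 'x' ↔ (c = 'x' ∨ c = 'X') := by
  unfold PySem.Chars.lowerChar PySem.Chars.isupper
  by_cases h : ('A' ≤ c ∧ c ≤ 'Z')
  · rw [if_pos (by simp [h.1, h.2])]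
    constructor
    · intro he
      have hz : c.toNat ≤ 90 := h.2
      have hv : Nat.isValidChar (c.toNat + 32) := Or.inl (by omega)
      have ht := congrArg Char.toNat he
      rw [Char.toNat_ofNat, if_pos hv] at ht
      have hx : ('x').toNat = 120 := by decide
      have h88 : c.toNat = 88 := by omega
      right
      apply Char.ext
      unfold Char.toNat at h88
      exact UInt32.toNat_inj.mp h88
    · rintro (rfl | rfl)
      · exact absurd h.2 (by decide)
      · decide
  · rw [if_neg (by simpa using fun h1 h2 => h ⟨h1, h2⟩)]
    constructor
    · exact Or.inl
    · rintro (rfl | rfl)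
      · rfl
      · exact absurd ⟨by decide, by decide⟩ h

theorem pv_lower_eq_x (o : List Char) :
    PySem.Chars.lower o = ['x'] ↔ (o = ['x'] ∨ o = ['X']) := by
  cases o with
  | nil => simp [PySem.Chars.lower]
  | cons c t =>
    cases t with
    | nil => simpa [PySem.Chars.lower] using pv_lowerChar_x c
    | cons d t' => simp [PySem.Chars.lower]

theorem pv_flush_eq (rep o : List Char) :
    (if PySem.Chars.lower o = ['x'] then rep else o) = pvFlush rep o := by
  unfold pvFlush
  by_cases hx : o = ['x'] ∨ o = ['X']
  · rw [if_pos ((pv_lower_eq_x o).mpr hx), if_pos hx]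
  · rw [if_neg (fun hl => hx ((pv_lower_eq_x o).mp hl)), if_neg hx]

theorem pv_join_cons (a : List Char) (l : List (List Char)) (h : l ≠ []) :
    PySem.Chars.join ['.'] (a :: l) = a ++ '.' :: PySem.Chars.join ['.'] l := by
  cases l with
  | nil => exact absurd rfl h
  | cons b t => rw [PySem.Chars.join_cons_cons]; simp

theorem pv_scan_cons_dot (rep rest cur : List Char) :
    pvScan rep ('.' :: rest) cur = pvFlush rep cur ++ '.' :: pvScan rep rest [] := by
  simp [pvScan]

theorem pv_scan_cons_colon (rep rest cur : List Char) :
    pvScan rep (':' :: rest) cur = pvFlush rep cur ++ ':' :: rest := by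
  simp [pvScan]

theorem pv_scan_cons_other (rep rest cur : List Char) (c : Char) (h1 : c ≠ ':') (h2 : c ≠ '.') :
    pvScan rep (c :: rest) cur = pvScan rep rest (cur ++ [c]) := by
  simp [pvScan, h1, h2]

theorem pv_scan_no_colon (rep : List Char) (l cur : List Char) (h : ':' ∉ l) :
    pvScan rep l cur = PySem.Chars.join ['.'] ((pvSplitAux cur l).map (pvFlush rep)) := by
  induction l generalizing cur with
  | nil => simp [pvScan, pvSplitAux, PySem.Chars.join_singleton]
  | cons c rest ih =>
    have hc : c ≠ ':' := fun hc => h (hc ▸ List.mem_cons_self)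
    have hrest : ':' ∉ rest := fun hm => h (List.mem_cons_of_mem _ hm)
    by_cases hd : c = '.'
    · subst hd
      rw [pv_scan_cons_dot, ih [] hrest]
      simp only [pvSplitAux, reduceIte, List.map_cons]
      rw [pv_join_cons _ _ (by simp [pvSplitAux_ne_nil])]
    · rw [pv_scan_cons_other _ _ _ _ hc hd, ih (cur ++ [c]) hrest]
      simp [pvSplitAux, hd]

theorem pv_scan_colon (rep : List Char) (pre suf cur : List Char) (h : ':' ∉ pre) :
    pvScan rep (pre ++ ':' :: suf) cur =
      PySem.Chars.join ['.'] ((pvSplitAux cur pre).map (pvFlush rep)) ++ ':' :: suf := by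
  induction pre generalizing cur with
  | nil =>
    simp only [List.nil_append, pv_scan_cons_colon, pvSplitAux, List.map_cons, List.map_nil,
      PySem.Chars.join_singleton]
  | cons c rest ih =>
    have hc : c ≠ ':' := fun hc => h (hc ▸ List.mem_cons_self)
    have hrest : ':' ∉ rest := fun hm => h (List.mem_cons_of_mem _ hm)
    by_cases hd : c = '.'
    · subst hd
      rw [List.cons_append, pv_scan_cons_dot, ih [] hrest]
      simp only [pvSplitAux, reduceIte, List.map_cons]
      rw [pv_join_cons _ _ (by simp [pvSplitAux_ne_nil])]
      simp
    · rw [List.cons_append, pv_scan_cons_other _ _ _ _ hc hd, ih (cur ++ [c]) hrest]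
      simp [pvSplitAux, hd]

theorem pv_partition_spec (cs : List Char) :
    (pvPartitionColon cs = (cs, [], []) ∧ ':' ∉ cs) ∨
    (∃ pre suf, ':' ∉ pre ∧ cs = pre ++ ':' :: suf ∧ pvPartitionColon cs = (pre, [':'], suf)) := by
  induction cs with
  | nil => exact Or.inl ⟨rfl, by simp⟩
  | cons c rest ih =>
    by_cases hc : c = ':'
    · subst hc
      exact Or.inr ⟨[], rest, by simp, by simp, by simp [pvPartitionColon]⟩
    · rcases ih with ⟨heq, hmem⟩ | ⟨pre, suf, hp, hm, heq⟩
      · refine Or.inl ⟨?_, by simp [hmem]; exact fun h => hc h.symm⟩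
        simp [pvPartitionColon, hc, heq]
      · refine Or.inr ⟨c :: pre, suf, by simp [hp]; exact fun h => hc h.symm, by simp [hm], ?_⟩
        simp [pvPartitionColon, hc, heq]

-- ===== VERDICT (by name: the statement is the Claim_ definition above) =====
theorem apply_team_to_target_spec : Claim_equal_apply_team_to_target := by
  intro target team_number _
  unfold Spec_apply_team_to_target
  cases team_number with
  | none => rfl
  | some n =>
    show (let p := pvPartitionColon target.toList
          let host := p.1
          let sep := p.2.1
          let port := p.2.2
          let octets := PySem.Chars.splitOn host ['.']
          let resolved := PySem.Chars.join ['.']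
            (octets.map (fun o => if PySem.Chars.lower o = ['x'] then PySem.Int.toChars n else o))
          if sep ≠ [] then String.mk (resolved ++ sep ++ port) else String.mk resolved)
        = String.mk (pvScan (PySem.Int.toChars n) target.toList [])
    simp only []
    rcases pv_partition_spec target.toList with ⟨heq, hmem⟩ | ⟨pre, suf, hp, hm, heq⟩
    · rw [heq]
      rw [if_neg (by simp)]
      rw [pv_splitOn_eq]
      rw [List.map_congr_left (fun o _ => pv_flush_eq (PySem.Int.toChars n) o)]
      rw [← pv_scan_no_colon _ _ _ hmem]
    · rw [heq]
      rw [if_pos (by simp)]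
      rw [pv_splitOn_eq]
      rw [List.map_congr_left (fun o _ => pv_flush_eq (PySem.Int.toChars n) o)]
      rw [hm, pv_scan_colon _ _ _ _ hp]
      simp
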